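-- pv_equiv track=rewrite | github.com/VanOFiuza/ProgMulti_Python | Exercicios12.py | todos_imparesQ
-- ===== SOURCE A (Python) =====
-- def todos_imparesQ(w) :
--     if len(w)==0 :
--         return True
--     else:
--         n = w.pop()
--         if n % 2 == 0:
--             return False
--         else :
--             return todos_imparesQ(w)
-- ===== SOURCE B (Python) =====
-- def todos_imparesQ(w):
--     while w:
--         n = w.pop()
--         if n % 2 == 0:
--             return False
--     return True
-- ===== Notes on version B (the rewrite author's own statement) =====
-- stated objective: simpler
-- what changed: Replaces the recursive call with an iterative while-loop that pops from the end and returns False on the first even element, keeping the same partial-emptying mutation.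
import Mathlib
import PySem

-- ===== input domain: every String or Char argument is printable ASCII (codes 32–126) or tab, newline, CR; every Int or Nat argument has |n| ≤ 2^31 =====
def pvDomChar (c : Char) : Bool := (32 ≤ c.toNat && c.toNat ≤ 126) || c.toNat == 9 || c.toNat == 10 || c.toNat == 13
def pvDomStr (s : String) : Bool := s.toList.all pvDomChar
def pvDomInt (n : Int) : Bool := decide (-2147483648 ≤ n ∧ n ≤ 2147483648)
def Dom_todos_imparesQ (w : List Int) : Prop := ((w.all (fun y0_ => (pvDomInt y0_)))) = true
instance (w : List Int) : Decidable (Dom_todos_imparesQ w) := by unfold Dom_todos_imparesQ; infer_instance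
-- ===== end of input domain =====

-- Header: B replaces A's recursion with an iterative while-pop loop (simpler, O(1) stack).
-- Both A and B mutate the argument in place (pop from the end until the first even
-- element or the list is empty); the theorem below is about the RETURN value only,
-- and both programs perform the identical mutation.

-- ===== PORT A =====
-- A: if empty return True; else pop the last element, return False if even, else recurse.
def todos_imparesQ (w : List Int) : Bool :=
  if h : w = [] then
    true
  else
    let n := w.getLast h          -- n = w.pop()
    if PySem.Int.mod n 2 == 0 then
      false
    else
      todos_imparesQ w.dropLast   -- recursive call on the popped list
termination_by w.length
decreasing_by simp [List.length_dropLast]; exact List.length_pos_iff.mpr h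

-- ===== PORT B =====
-- B's while-loop: repeatedly pop the last element (processing the reversed list
-- front-to-back), return false on the first even element, true when exhausted.
def todosAltLoop : List Int → Bool
  | [] => true
  | n :: rest => if PySem.Int.mod n 2 == 0 then false else todosAltLoop rest

def todos_imparesQ_alt (w : List Int) : Bool := todosAltLoop w.reverse

-- ===== PRECONDITION & SPEC =====
def Spec_todos_imparesQ (w : List Int) (out : Bool) : Prop := out = todos_imparesQ_alt w
instance (w : List Int) (out : Bool) : Decidable (Spec_todos_imparesQ w out) := by unfold Spec_todos_imparesQ; infer_instance

-- ===== CLAIM (what is proved, stated in full; the proofs are below) =====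
def Claim_equal_todos_imparesQ : Prop := ∀ (w : List Int), Dom_todos_imparesQ w → Spec_todos_imparesQ w (todos_imparesQ w)

-- ===== LEMMAS AND PROOFS =====

theorem todos_imparesQ_rev (l : List Int) : todos_imparesQ l.reverse = todosAltLoop l := by
  induction l with
  | nil => simp [todos_imparesQ, todosAltLoop]
  | cons n rest ih =>
    rw [todos_imparesQ]
    simp only [List.reverse_cons]
    have hne : rest.reverse ++ [n] ≠ [] := by simp
    rw [dif_neg hne]
    simp [List.getLast_append, List.dropLast_concat, todosAltLoop, ih]

-- ===== VERDICT (by name: the statement is the Claim_ definition above) =====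
theorem todos_imparesQ_spec : Claim_equal_todos_imparesQ := by
  intro w _
  unfold Spec_todos_imparesQ todos_imparesQ_alt
  rw [← todos_imparesQ_rev w.reverse, List.reverse_reverse]
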